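-- pv_equiv track=rewrite | github.com/fenre/splunk-monitoring-use-cases | tools/build/render_search.py | _build_postings
-- ===== SOURCE A (Python) =====
-- MIN_DF = 2
--
-- MAX_DF = 4_000
--
-- def _build_postings(
--     docs: dict[str, set[str]],
--     uc_idx: dict[str, int],
-- ) -> dict[str, list[int]]:
--     """Inverted index ``{token: [docid, ...]}`` after DF pruning."""
--     raw: dict[str, list[int]] = {}
--     for uc_id, tokens in docs.items():
--         i = uc_idx[uc_id]
--         for t in tokens:
--             raw.setdefault(t, []).append(i)
--     pruned: dict[str, list[int]] = {}
--     for t, ids in raw.items():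
--         if MIN_DF <= len(ids) <= MAX_DF:
--             pruned[t] = sorted(ids)
--     return pruned
-- ===== SOURCE B (Python) =====
-- MIN_DF = 2
--
-- MAX_DF = 4_000
--
-- def _build_postings(docs, uc_idx):
--     """Inverted index ``{token: [docid, ...]}`` after DF pruning."""
--     # Pass 1: document frequency of every token.
--     df = {}
--     for tokens in docs.values():
--         for t in tokens:
--             df[t] = df.get(t, 0) + 1
--     # Pass 2: build posting lists only for tokens that survive pruning,
--     # so rare and ubiquitous tokens never get a list at all.
--     pruned = {}
--     for uc_id, tokens in docs.items():
--         i = uc_idx[uc_id]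
--         for t in tokens:
--             if MIN_DF <= df[t] <= MAX_DF:
--                 pruned.setdefault(t, []).append(i)
--     for ids in pruned.values():
--         ids.sort()
--     return pruned
-- ===== Notes on version B (the rewrite author's own statement) =====
-- stated objective: alternative
-- what changed: B counts document frequencies in a first pass and prunes BEFORE building posting lists, so out-of-range tokens never get a list; A builds every posting list first and prunes afterwards. Pre_ excludes list encodings with duplicate doc ids / index keys / duplicate tokens in one document (no Python dict or set carries duplicates) and docs whose id is missing from uc_idx, where A raises KeyError.
import Mathlib
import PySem

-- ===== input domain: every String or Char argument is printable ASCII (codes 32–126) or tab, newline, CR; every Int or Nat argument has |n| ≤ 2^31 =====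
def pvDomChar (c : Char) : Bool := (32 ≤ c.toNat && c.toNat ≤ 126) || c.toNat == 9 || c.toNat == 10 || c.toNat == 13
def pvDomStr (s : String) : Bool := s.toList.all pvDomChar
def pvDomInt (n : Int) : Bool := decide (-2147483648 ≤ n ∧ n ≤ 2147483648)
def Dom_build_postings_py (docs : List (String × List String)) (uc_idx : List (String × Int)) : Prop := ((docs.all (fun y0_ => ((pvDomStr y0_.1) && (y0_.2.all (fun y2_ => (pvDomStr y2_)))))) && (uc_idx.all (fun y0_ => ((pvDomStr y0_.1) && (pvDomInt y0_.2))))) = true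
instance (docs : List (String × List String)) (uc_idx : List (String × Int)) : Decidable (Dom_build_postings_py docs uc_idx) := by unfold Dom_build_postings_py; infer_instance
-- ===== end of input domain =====

-- B counts document frequencies first and prunes BEFORE building posting lists;
-- A builds all posting lists and prunes afterwards. Equivalence is about the return value.

-- ===== PORT A =====
def build_postings_py (docs : List (String × List String)) (uc_idx : List (String × Int)) : List (String × List Int) :=
  let raw : PySem.Dict String (List Int) :=
    docs.foldl (fun raw p =>
      let i : Int := (PySem.Dict.mk uc_idx).getD p.1 0  -- uc_idx[uc_id]; missing key (KeyError) is excluded by Pre_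
      p.2.foldl (fun raw t => raw.modify t [] (fun ids => ids ++ [i])) raw)  -- raw.setdefault(t, []).append(i)
      PySem.Dict.empty
  let pruned : PySem.Dict String (List Int) :=
    raw.items.foldl (fun pruned q =>
      if 2 ≤ q.2.length ∧ q.2.length ≤ 4000 then pruned.insert q.1 (PySem.List.sorted q.2 (fun x => x) false)
      else pruned)
      PySem.Dict.empty
  pruned.items

-- ===== PORT B =====
def build_postings_py_alt (docs : List (String × List String)) (uc_idx : List (String × Int)) : List (String × List Int) :=
  -- pass 1: document frequency of every token (df[t] = df.get(t, 0) + 1)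
  let df : PySem.Dict String Int :=
    docs.foldl (fun df p => p.2.foldl (fun df t => df.insert t (df.getD t 0 + 1)) df) PySem.Dict.empty
  -- pass 2: posting lists only for tokens whose df is already known to be in range
  let pruned : PySem.Dict String (List Int) :=
    docs.foldl (fun pruned p =>
      let i : Int := (PySem.Dict.mk uc_idx).getD p.1 0  -- uc_idx[uc_id]; KeyError excluded by Pre_
      p.2.foldl (fun pruned t =>
        if 2 ≤ df.getD t 0 ∧ df.getD t 0 ≤ 4000 then pruned.modify t [] (fun ids => ids ++ [i])  -- pruned.setdefault(t, []).append(i)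
        else pruned) pruned)
      PySem.Dict.empty
  -- 'for ids in pruned.values(): ids.sort()' — sort each value in place
  pruned.items.map (fun q => (q.1, PySem.List.sorted q.2 (fun x => x) false))

-- ===== PRECONDITION & SPEC =====
-- Pre_ states dict/set representability of the Lean lists (distinct doc ids, distinct index keys,
-- distinct tokens per document — Python's dict/set types cannot carry duplicates) and that every
-- document id is a key of uc_idx (otherwise Python A raises KeyError).
def Pre_build_postings_py (docs : List (String × List String)) (uc_idx : List (String × Int)) : Prop :=
  (docs.map Prod.fst).Nodup ∧ (∀ p ∈ docs, p.2.Nodup) ∧ (uc_idx.map Prod.fst).Nodup ∧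
  (∀ p ∈ docs, p.1 ∈ uc_idx.map Prod.fst)
instance (docs : List (String × List String)) (uc_idx : List (String × Int)) : Decidable (Pre_build_postings_py docs uc_idx) := by unfold Pre_build_postings_py; infer_instance

def pvWitness_build_postings_py : (List (String × List String)) × (List (String × Int)) :=
  ([("a", ["x", "y"]), ("b", ["x"])], [("a", 1), ("b", 0)])

def Spec_build_postings_py (docs : List (String × List String)) (uc_idx : List (String × Int)) (out : List (String × List Int)) : Prop := out = build_postings_py_alt docs uc_idx
instance (docs : List (String × List String)) (uc_idx : List (String × Int)) (out : List (String × List Int)) : Decidable (Spec_build_postings_py docs uc_idx out) := by unfold Spec_build_postings_py; infer_instance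

-- ===== CLAIM (what is proved, stated in full; the proofs are below) =====
def Claim_equal_build_postings_py : Prop := ∀ (docs : List (String × List String)) (uc_idx : List (String × Int)), Dom_build_postings_py docs uc_idx → Pre_build_postings_py docs uc_idx → Spec_build_postings_py docs uc_idx (build_postings_py docs uc_idx)

-- ===== LEMMAS AND PROOFS =====

-- the token/docid pairs A's first loop feeds to the grouping dict, in iteration order
def pvPairs (uc_idx : List (String × Int)) (ds : List (String × List String)) : List (String × Int) :=
  ds.flatMap (fun p => p.2.map (fun t => (t, (PySem.Dict.mk uc_idx).getD p.1 0)))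

-- the grouping fold both fill loops reduce to
def pvGroup (l : List (String × Int)) (d : PySem.Dict String (List Int)) : PySem.Dict String (List Int) :=
  l.foldl (fun d q => d.modify q.1 [] (fun ids => ids ++ [q.2])) d

-- docids of the documents of ds that contain token t, in ds order
def pvVA (uc_idx : List (String × Int)) (ds : List (String × List String)) (t : String) : List Int :=
  (ds.filter (fun p => decide (t ∈ p.2))).map (fun p => (PySem.Dict.mk uc_idx).getD p.1 0)

theorem pvInnerFill (i : Int) : ∀ (ts : List String) (d : PySem.Dict String (List Int)),
    ts.foldl (fun raw t => raw.modify t [] (fun ids => ids ++ [i])) d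
      = pvGroup (ts.map (fun t => (t, i))) d := by
  intro ts
  induction ts with
  | nil => intro d; rfl
  | cons t ts ih => intro d; simp only [pvGroup, List.map_cons, List.foldl_cons] at ih ⊢; exact ih _

theorem pvFillEq (uc_idx : List (String × Int)) : ∀ (ds : List (String × List String)) (d : PySem.Dict String (List Int)),
    ds.foldl (fun raw p => p.2.foldl (fun raw t => raw.modify t [] (fun ids => ids ++ [(PySem.Dict.mk uc_idx).getD p.1 0])) raw) d
      = pvGroup (pvPairs uc_idx ds) d := by
  intro ds
  induction ds with
  | nil => intro d; rfl
  | cons p ds ih =>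
    intro d
    simp only [pvPairs, pvGroup, List.flatMap_cons, List.foldl_append, List.foldl_cons] at ih ⊢
    rw [pvInnerFill]
    simp only [pvGroup]
    rw [ih]

theorem pvFilterMapPair (t : String) (i : Int) : ∀ (ts : List String), ts.Nodup →
    (ts.map (fun x => (x, i))).filter (fun q => q.1 == t)
      = if t ∈ ts then [(t, i)] else [] := by
  intro ts
  induction ts with
  | nil => intro _; simp
  | cons x ts ih =>
    intro hnd
    rcases List.nodup_cons.mp hnd with ⟨hx, hnd'⟩
    by_cases hxt : x = t
    · subst hxt
      simp [ih hnd', hx]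
    · simp [hxt, ih hnd', Ne.symm hxt]

theorem pvPairsFilter (uc_idx : List (String × Int)) (t : String) :
    ∀ (ds : List (String × List String)), (∀ p ∈ ds, p.2.Nodup) →
    ((pvPairs uc_idx ds).filter (fun q => q.1 == t)).map (fun q => q.2) = pvVA uc_idx ds t := by
  intro ds
  induction ds with
  | nil => intro _; rfl
  | cons p ds ih =>
    intro hnd
    have hp : p.2.Nodup := hnd p (by simp)
    have hrest := ih (fun q hq => hnd q (by simp [hq]))
    simp only [pvPairs, pvVA, List.flatMap_cons, List.filter_append, List.map_append, List.filter_cons] at hrest ⊢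
    rw [pvFilterMapPair t _ _ hp]
    by_cases ht : t ∈ p.2
    · simp [ht, hrest]
    · simp [ht, hrest]

theorem pvPairsMapFst (uc_idx : List (String × Int)) (ds : List (String × List String)) :
    (pvPairs uc_idx ds).map Prod.fst = ds.flatMap (fun p => p.2) := by
  induction ds with
  | nil => rfl
  | cons p ds ih =>
    show (p.2.map (fun t => (t, (PySem.Dict.mk uc_idx).getD p.1 0)) ++ pvPairs uc_idx ds).map Prod.fst
        = p.2 ++ ds.flatMap (fun p => p.2)
    rw [List.map_append, ih, List.map_map]
    congr 1
    show p.2.map (fun t => t) = p.2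
    exact List.map_id' p.2

-- the df counting loop counts occurrences in the concatenation of all token lists
theorem pvDfCount (t : String) : ∀ (ds : List (String × List String)) (d : PySem.Dict String Int),
    (ds.foldl (fun d p => p.2.foldl (fun d t => d.insert t (d.getD t 0 + 1)) d) d).getD t 0
      = d.getD t 0 + ((ds.flatMap (fun p => p.2)).count t : Int) := by
  intro ds
  induction ds with
  | nil => intro d; simp
  | cons p ds ih =>
    intro d
    simp only [List.foldl_cons, List.flatMap_cons, List.count_append]
    rw [ih, PySem.Dict.getD_foldl_insert_add_one]
    push_cast
    ring

-- with per-document distinct tokens, that count is the number of documents containing t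
theorem pvCountEqLen (uc_idx : List (String × Int)) (t : String) :
    ∀ (ds : List (String × List String)), (∀ p ∈ ds, p.2.Nodup) →
    (ds.flatMap (fun p => p.2)).count t = (pvVA uc_idx ds t).length := by
  intro ds
  induction ds with
  | nil => intro _; rfl
  | cons p ds ih =>
    intro hnd
    have hp : p.2.Nodup := hnd p (by simp)
    have hrest := ih (fun q hq => hnd q (by simp [hq]))
    simp only [pvVA, List.flatMap_cons, List.count_append, List.filter_cons] at hrest ⊢
    by_cases ht : t ∈ p.2
    · have h1 : p.2.count t = 1 := List.count_eq_one_of_mem hp ht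
      simp only [ht, h1, hrest]
      simp [Nat.add_comm]
    · have h0 : p.2.count t = 0 := List.count_eq_zero.mpr ht
      simp [ht, h0, hrest]

-- map over a filter commutes with pairing each token with the doc id
theorem pvFilterMapComm (pb : String → Bool) (i : Int) : ∀ (l : List String),
    (l.filter pb).map (fun t => (t, i)) = (l.map (fun t => (t, i))).filter (fun q => pb q.1) := by
  intro l
  induction l with
  | nil => rfl
  | cons x l ih =>
    by_cases hx : pb x
    · simp [hx, ih]
    · simp [hx, ih]

-- the guarded fill loop of B groups exactly the pairs whose token passes the filter
theorem pvFillFiltered (uc_idx : List (String × Int)) (P : String → Prop) [DecidablePred P] :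
    ∀ (ds : List (String × List String)) (d : PySem.Dict String (List Int)),
    ds.foldl (fun pr p =>
      p.2.foldl (fun pr t =>
        if P t then pr.modify t [] (fun ids => ids ++ [(PySem.Dict.mk uc_idx).getD p.1 0]) else pr) pr) d
      = pvGroup ((pvPairs uc_idx ds).filter (fun q => decide (P q.1))) d := by
  intro ds
  induction ds with
  | nil => intro d; rfl
  | cons p ds ih =>
    intro d
    simp only [List.foldl_cons, pvPairs, List.flatMap_cons, List.filter_append, pvGroup,
      List.foldl_append] at ih ⊢
    rw [PySem.List.foldl_ite_eq_foldl_filter, pvInnerFill, pvFilterMapComm]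
    simp only [pvGroup]
    rw [ih]

theorem pvFilterFilterBeq (pb : String → Bool) (t : String) : ∀ (l : List (String × Int)),
    (l.filter (fun q => pb q.1)).filter (fun q => q.1 == t)
      = if pb t then l.filter (fun q => q.1 == t) else [] := by
  intro l
  induction l with
  | nil => simp
  | cons q l ih =>
    by_cases hq : q.1 = t
    · by_cases hp : pb t
      · simp [hq, hp, ih]
      · simp [hq, hp, ih]
    · by_cases hp : pb q.1
      · simp [hq, hp, ih]
      · simp [hq, hp, ih]

-- set(...) of a filtered list is the filter of the set (first occurrences survive filtering)
theorem pvOfListFilter (pb : String → Bool) : ∀ (l : List String),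
    PySem.Set.ofList (l.filter pb) = (PySem.Set.ofList l).filter pb := by
  intro l
  induction l using List.reverseRecOn with
  | nil => simp
  | append_singleton l x ih =>
    rw [List.filter_append, PySem.Set.ofList_append_singleton, List.filter_singleton]
    by_cases hx : pb x
    · simp only [hx, cond_true]
      rw [PySem.Set.ofList_append_singleton, ih]
      simp only [PySem.Set.add]
      by_cases hm : x ∈ l
      · have h1 : PySem.Set.contains (PySem.Set.ofList l) x = true := by
          simp [PySem.Set.mem_ofList, hm]
        have h2 : PySem.Set.contains ((PySem.Set.ofList l).filter pb) x = true := by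
          simp [List.mem_filter, PySem.Set.mem_ofList, hm, hx]
        rw [h1, h2]
        simp
      · have h1 : PySem.Set.contains (PySem.Set.ofList l) x = false := by
          simp [PySem.Set.mem_ofList, hm]
        have h2 : PySem.Set.contains ((PySem.Set.ofList l).filter pb) x = false := by
          simp [List.mem_filter, PySem.Set.mem_ofList, hm]
        rw [h1, h2]
        simp [List.filter_append, hx]
    · simp only [hx, cond_false, List.append_nil]
      rw [ih]
      simp only [PySem.Set.add]
      by_cases hc : PySem.Set.contains (PySem.Set.ofList l) x
      · rw [if_pos hc]
      · rw [if_neg hc]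
        simp [List.filter_append, hx]

-- ===== VERDICT (by name: the statement is the Claim_ definition above) =====
theorem build_postings_py_spec : Claim_equal_build_postings_py := by
  intro docs uc_idx _hdom hpre
  obtain ⟨hk, htok, hik, hmem⟩ := hpre
  simp only [Spec_build_postings_py, build_postings_py, build_postings_py_alt]
  rw [pvFillEq, pvFillFiltered]
  -- shared characterization of the grouped raw dict
  have hndA : (pvGroup (pvPairs uc_idx docs) PySem.Dict.empty).keys.Nodup := by
    simp only [pvGroup]
    apply PySem.Dict.nodup_keys_foldl_modify_key (key := Prod.fst)
    exact PySem.Dict.nodup_keys_empty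
  have hkA : (pvGroup (pvPairs uc_idx docs) PySem.Dict.empty).keys = PySem.Set.ofList (docs.flatMap (fun p => p.2)) := by
    simp only [pvGroup]
    have h := PySem.Dict.keys_foldl_modify_key (l := pvPairs uc_idx docs) (key := Prod.fst) (d0 := ([] : List Int)) (f := fun d q => (fun ids => ids ++ [q.2])) (d := PySem.Dict.empty)
    simpa [pvPairsMapFst, PySem.Dict.keys_empty, PySem.Set.update_nil_left] using h
  have hgA : ∀ t, (pvGroup (pvPairs uc_idx docs) PySem.Dict.empty).getD t [] = pvVA uc_idx docs t := by
    intro t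
    simp only [pvGroup]
    rw [PySem.Dict.getD_foldl_modify_append]
    rw [PySem.Dict.getD_empty]
    simpa using pvPairsFilter uc_idx t docs htok
  have hiA : (pvGroup (pvPairs uc_idx docs) PySem.Dict.empty).items
      = (PySem.Set.ofList (docs.flatMap (fun p => p.2))).map (fun t => (t, pvVA uc_idx docs t)) := by
    rw [PySem.Dict.items_eq_map_keys _ hndA ([] : List Int), hkA]
    exact List.map_congr_left (fun t _ => by rw [hgA])
  -- the two pruning predicates coincide: B's df value is the length of A's posting list
  have hdf : ∀ t, (docs.foldl (fun df p => p.2.foldl (fun df t => df.insert t (df.getD t 0 + 1)) df) (PySem.Dict.empty : PySem.Dict String Int)).getD t 0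
      = ((pvVA uc_idx docs t).length : Int) := by
    intro t
    rw [pvDfCount, PySem.Dict.getD_empty, pvCountEqLen uc_idx t docs htok]
    simp
  have hpred : (fun q : String × Int => decide (2 ≤ (docs.foldl (fun df p => p.2.foldl (fun df t => df.insert t (df.getD t 0 + 1)) df) (PySem.Dict.empty : PySem.Dict String Int)).getD q.1 0
        ∧ (docs.foldl (fun df p => p.2.foldl (fun df t => df.insert t (df.getD t 0 + 1)) df) (PySem.Dict.empty : PySem.Dict String Int)).getD q.1 0 ≤ 4000))
      = (fun q : String × Int => decide (2 ≤ (pvVA uc_idx docs q.1).length ∧ (pvVA uc_idx docs q.1).length ≤ 4000)) := by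
    funext q
    apply decide_eq_decide.mpr
    rw [hdf q.1]
    constructor
    · intro h; exact ⟨by exact_mod_cast h.1, by exact_mod_cast h.2⟩
    · intro h; exact ⟨by exact_mod_cast h.1, by exact_mod_cast h.2⟩
  rw [hpred]
  -- B-side characterization of the filtered grouping dict
  have hndB : (pvGroup ((pvPairs uc_idx docs).filter (fun q => decide (2 ≤ (pvVA uc_idx docs q.1).length ∧ (pvVA uc_idx docs q.1).length ≤ 4000))) PySem.Dict.empty).keys.Nodup := by
    simp only [pvGroup]
    apply PySem.Dict.nodup_keys_foldl_modify_key (key := Prod.fst)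
    exact PySem.Dict.nodup_keys_empty
  have hkB : (pvGroup ((pvPairs uc_idx docs).filter (fun q => decide (2 ≤ (pvVA uc_idx docs q.1).length ∧ (pvVA uc_idx docs q.1).length ≤ 4000))) PySem.Dict.empty).keys
      = (PySem.Set.ofList (docs.flatMap (fun p => p.2))).filter (fun t => decide (2 ≤ (pvVA uc_idx docs t).length ∧ (pvVA uc_idx docs t).length ≤ 4000)) := by
    simp only [pvGroup]
    have h := PySem.Dict.keys_foldl_modify_key (l := (pvPairs uc_idx docs).filter (fun q => decide (2 ≤ (pvVA uc_idx docs q.1).length ∧ (pvVA uc_idx docs q.1).length ≤ 4000))) (key := Prod.fst) (d0 := ([] : List Int)) (f := fun d q => (fun ids => ids ++ [q.2])) (d := PySem.Dict.empty)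
    rw [h, PySem.Dict.keys_empty, PySem.Set.update_nil_left]
    have hmf : ((pvPairs uc_idx docs).filter (fun q => decide (2 ≤ (pvVA uc_idx docs q.1).length ∧ (pvVA uc_idx docs q.1).length ≤ 4000))).map Prod.fst
        = ((pvPairs uc_idx docs).map Prod.fst).filter (fun t => decide (2 ≤ (pvVA uc_idx docs t).length ∧ (pvVA uc_idx docs t).length ≤ 4000)) := by
      rw [List.filter_map]
      rfl
    rw [hmf, pvPairsMapFst, pvOfListFilter]
  have hgB : ∀ t, (pvGroup ((pvPairs uc_idx docs).filter (fun q => decide (2 ≤ (pvVA uc_idx docs q.1).length ∧ (pvVA uc_idx docs q.1).length ≤ 4000))) PySem.Dict.empty).getD t []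
      = if (2 ≤ (pvVA uc_idx docs t).length ∧ (pvVA uc_idx docs t).length ≤ 4000) then pvVA uc_idx docs t else [] := by
    intro t
    simp only [pvGroup]
    rw [PySem.Dict.getD_foldl_modify_append, PySem.Dict.getD_empty,
      pvFilterFilterBeq (fun x => decide (2 ≤ (pvVA uc_idx docs x).length ∧ (pvVA uc_idx docs x).length ≤ 4000)) t]
    by_cases h : 2 ≤ (pvVA uc_idx docs t).length ∧ (pvVA uc_idx docs t).length ≤ 4000
    · rw [if_pos (decide_eq_true h), if_pos h]
      simpa using pvPairsFilter uc_idx t docs htok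
    · rw [if_neg (by simpa using h), if_neg h]
      simp
  have hiB : (pvGroup ((pvPairs uc_idx docs).filter (fun q => decide (2 ≤ (pvVA uc_idx docs q.1).length ∧ (pvVA uc_idx docs q.1).length ≤ 4000))) PySem.Dict.empty).items
      = ((PySem.Set.ofList (docs.flatMap (fun p => p.2))).filter (fun t => decide (2 ≤ (pvVA uc_idx docs t).length ∧ (pvVA uc_idx docs t).length ≤ 4000))).map (fun t => (t, pvVA uc_idx docs t)) := by
    rw [PySem.Dict.items_eq_map_keys _ hndB ([] : List Int), hkB]
    refine List.map_congr_left ?_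
    intro t htmem
    have hpa : 2 ≤ (pvVA uc_idx docs t).length ∧ (pvVA uc_idx docs t).length ≤ 4000 := by
      have := (List.mem_filter.mp htmem).2
      simpa using this
    rw [hgB t, if_pos hpa]
  -- A-side pruning loop
  rw [PySem.List.foldl_ite_eq_foldl_filter, hiA, hiB, List.filter_map, List.map_map]
  have hcomp : ((fun q : String × List Int => 2 ≤ q.2.length ∧ q.2.length ≤ 4000) ∘ fun t => (t, pvVA uc_idx docs t))
      = fun t => 2 ≤ (pvVA uc_idx docs t).length ∧ (pvVA uc_idx docs t).length ≤ 4000 := rfl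
  rw [List.foldl_map]
  rw [PySem.Dict.items_foldl_insert_fresh (k := fun t => t) (v := fun t => PySem.List.sorted (pvVA uc_idx docs t) (fun x => x) false)]
  · simp only [PySem.Dict.empty, List.nil_append, Function.comp_def]
  · intro a _; exact PySem.Dict.contains_empty a
  · simpa using ((PySem.Set.nodup_ofList (docs.flatMap (fun p => p.2))).filter _)
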